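-- pv_equiv track=rewrite | github.com/yuwchen/speech_processing_tools | VAD/waveform_segmentation.py | get_boundary
-- ===== SOURCE A (Python) =====
-- def get_boundary(vad):
--     boundary = []
--     previous_flag = '0'
--     for i in range(len(vad)):
--         current_flag = vad[i]
--         if current_flag!=previous_flag:
--             boundary.append(i)
--             previous_flag = current_flag
--     return boundary
-- ===== SOURCE B (Python) =====
-- def get_boundary(vad):
--     # scan maximal runs of equal flags; a run starting with a flag different
--     # from the previous run's flag (seeded with '0') starts a boundary
--     boundary = []
--     i = 0
--     n = len(vad)
--     prev = '0'
--     while i < n: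
--         key = vad[i]
--         j = i + 1
--         while j < n and vad[j] == key:
--             j += 1
--         if key != prev:
--             boundary.append(i)
--         prev = key
--         i = j
--     return boundary
-- ===== Notes on version B (the rewrite author's own statement) =====
-- stated objective: alternative
-- what changed: B scans maximal runs of equal flags with an inner run-advancing pointer and emits the run start when its flag differs from the previous run's, instead of A's per-index loop with a flag accumulator.
import Mathlib
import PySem

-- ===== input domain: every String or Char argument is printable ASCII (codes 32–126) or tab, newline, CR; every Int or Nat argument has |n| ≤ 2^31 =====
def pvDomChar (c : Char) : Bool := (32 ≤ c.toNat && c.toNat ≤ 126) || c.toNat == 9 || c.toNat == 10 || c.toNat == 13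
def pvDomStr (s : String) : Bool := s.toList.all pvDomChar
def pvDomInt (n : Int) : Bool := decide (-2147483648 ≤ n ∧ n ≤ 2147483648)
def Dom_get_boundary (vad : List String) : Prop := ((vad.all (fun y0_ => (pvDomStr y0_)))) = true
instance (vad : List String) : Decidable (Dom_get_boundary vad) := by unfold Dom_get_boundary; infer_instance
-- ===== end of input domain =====

-- B re-implements A by scanning maximal runs of equal flags (alternative decomposition; same O(n) cost).

-- ===== PORT A =====
-- A's loop: one step per index, carrying `boundary` and `previous_flag`.
def pvGoA : List String → String → Int → List Int → List Int
  | [], _, _, acc => acc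
  | x :: xs, prev, i, acc =>
    if x ≠ prev then pvGoA xs x (i + 1) (acc ++ [i])
    else pvGoA xs prev (i + 1) acc

def get_boundary (vad : List String) : List Int := pvGoA vad "0" 0 []

-- ===== PORT B =====
-- B's outer while loop: one step per maximal run; the inner pointer advance
-- `while j < n and vad[j] == key: j += 1` is the takeWhile/drop of the run tail.
def pvGoB : List String → String → Int → List Int
  | [], _, _ => []
  | x :: xs, prev, i =>
    let t := (xs.takeWhile (fun y => y = x)).length
    (if x ≠ prev then [i] else []) ++ pvGoB (xs.drop t) x (i + 1 + t)
termination_by xs _ _ => xs.length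
decreasing_by simp [List.length_drop]

def get_boundary_alt (vad : List String) : List Int := pvGoB vad "0" 0

-- ===== PRECONDITION & SPEC =====
def Spec_get_boundary (vad : List String) (out : List Int) : Prop := out = get_boundary_alt vad
instance (vad : List String) (out : List Int) : Decidable (Spec_get_boundary vad out) := by unfold Spec_get_boundary; infer_instance

-- ===== CLAIM (what is proved, stated in full; the proofs are below) =====
def Claim_equal_get_boundary : Prop := ∀ (vad : List String), Dom_get_boundary vad → Spec_get_boundary vad (get_boundary vad)

-- ===== LEMMAS AND PROOFS =====

theorem pvGoB_cons (x : String) (xs : List String) (prev : String) (i : Int) :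
    pvGoB (x :: xs) prev i =
      (if x ≠ prev then [i] else []) ++
        pvGoB (xs.drop (xs.takeWhile (fun y => y = x)).length) x
          (i + 1 + (xs.takeWhile (fun y => y = x)).length) := by
  rw [pvGoB.eq_def]

theorem pvGoB_nil (prev : String) (i : Int) : pvGoB [] prev i = [] := by
  rw [pvGoB.eq_def]

-- consuming one element of the current run is a no-op for B's recursion
theorem pvGoB_self (x : String) (xs : List String) (i : Int) :
    pvGoB (x :: xs) x i = pvGoB xs x (i + 1) := by
  cases xs with
  | nil => simp [pvGoB_cons, pvGoB_nil]
  | cons y ys =>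
    by_cases h : y = x
    · subst h
      simp [pvGoB_cons, List.takeWhile]
      ring_nf
    · simp [pvGoB_cons, List.takeWhile, h]

theorem pvGoB_cons_ne (x : String) (xs : List String) (prev : String) (i : Int)
    (h : x ≠ prev) : pvGoB (x :: xs) prev i = i :: pvGoB xs x (i + 1) := by
  have hx := pvGoB_self x xs i
  rw [pvGoB_cons] at hx ⊢
  simp at hx
  simp [h, hx]

theorem pvGoA_eq (xs : List String) (prev : String) (i : Int) (acc : List Int) :
    pvGoA xs prev i acc = acc ++ pvGoB xs prev i := by
  induction xs generalizing prev i acc with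
  | nil => simp [pvGoA, pvGoB_nil]
  | cons x xs ih =>
    by_cases h : x = prev
    · subst h
      simp [pvGoA, ih, pvGoB_self]
    · simp [pvGoA, h, ih, pvGoB_cons_ne x xs prev i h]

-- ===== VERDICT (by name: the statement is the Claim_ definition above) =====
theorem get_boundary_spec : Claim_equal_get_boundary := by
  intro vad _
  unfold Spec_get_boundary get_boundary get_boundary_alt
  simpa using pvGoA_eq vad "0" 0 []
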